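-- pv_equiv track=rewrite | github.com/MrBrantCode/unitest_baseline | mut_generate/mist_train_taco/taco_19052/solution.py | recurse
-- ===== SOURCE A (Python) =====
-- import math
--
-- def recurse(lpfs, i, aa, bb):
--     if i == len(lpfs):
--         a = math.isqrt(aa - 1)
--         b = math.isqrt(bb - 1)
--         if a > 0 and b > 0 and (a * a + 1 == aa) and (b * b + 1 == bb) and (math.gcd(a, b) == 1):
--             return 1
--         else:
--             return 0
--     (p, e) = lpfs[i]
--     if p == 2:
--         if e % 2 == 1:
--             return recurse(lpfs, i + 1, 2 * aa, bb) + recurse(lpfs, i + 1, aa, 2 * bb)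
--         else:
--             return recurse(lpfs, i + 1, aa, bb) + recurse(lpfs, i + 1, 2 * aa, 2 * bb)
--     else:
--         return sum((recurse(lpfs, i + 1, aa * p ** j, bb * p ** k) for j in range(e + 1) for k in range(e - j + 1) if (e - j - k) % 2 == 0))
-- ===== SOURCE B (Python) =====
-- import math
--
-- def _children(p, e, x, y):
--     if p == 2:
--         if e % 2 == 1:
--             return [(2 * x, y), (x, 2 * y)]
--         return [(x, y), (2 * x, 2 * y)]
--     out = []
--     for j in range(e + 1):
--         for k in range(e - j + 1):
--             if (e - j - k) % 2 == 0:
--                 out.append((x * p ** j, y * p ** k))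
--     return out
--
-- def recurse(lpfs, i, aa, bb):
--     states = [(aa, bb)]
--     for (p, e) in lpfs[i:]:
--         new_states = []
--         for (x, y) in states:
--             new_states += _children(p, e, x, y)
--         states = new_states
--     total = 0
--     for (x, y) in states:
--         a = math.isqrt(x - 1)
--         b = math.isqrt(y - 1)
--         if a > 0 and b > 0 and a * a + 1 == x and b * b + 1 == y and math.gcd(a, b) == 1:
--             total += 1
--     return total
-- ===== Notes on version B (the rewrite author's own statement) =====
-- stated objective: alternative
-- what changed: Replaced the branching recursion over index i with an iterative worklist: a list of (aa,bb) states is expanded factor by factor over lpfs[i:] (duplicates kept, preserving multiplicity), and the valid square-plus-one coprime leaves are counted in one final pass.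
-- outside the precondition, e.g. on recurse([(2, 1)], -1, 1, 2): A returns 0, B returns 1
import Mathlib
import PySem

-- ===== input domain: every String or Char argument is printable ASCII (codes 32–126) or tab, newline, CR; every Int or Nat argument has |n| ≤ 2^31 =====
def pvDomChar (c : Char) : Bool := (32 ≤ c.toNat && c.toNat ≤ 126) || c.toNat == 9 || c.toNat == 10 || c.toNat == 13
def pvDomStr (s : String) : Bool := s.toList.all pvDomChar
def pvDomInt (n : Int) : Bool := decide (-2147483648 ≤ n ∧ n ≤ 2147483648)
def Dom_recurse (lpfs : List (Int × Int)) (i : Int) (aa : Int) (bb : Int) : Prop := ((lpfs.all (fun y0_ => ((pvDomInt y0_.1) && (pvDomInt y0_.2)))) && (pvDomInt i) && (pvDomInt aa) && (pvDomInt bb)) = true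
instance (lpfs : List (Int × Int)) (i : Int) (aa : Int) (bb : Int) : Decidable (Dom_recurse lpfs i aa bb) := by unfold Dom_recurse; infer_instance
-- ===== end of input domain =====

-- B replaces A's branching recursion by an iterative worklist of (aa,bb) states expanded
-- factor by factor, then one counting pass over the leaves (objective: alternative decomposition,
-- same cost). Equivalence is claimed on Pre_ (see its comment).

-- leaf test shared verbatim by both Pythons: a = isqrt(aa-1), b = isqrt(bb-1), count 1 iff
-- a,b > 0, a²+1 = aa, b²+1 = bb, gcd(a,b) = 1.  math.isqrt is ported as Nat.sqrt ∘ Int.toNat,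
-- exact for aa-1 ≥ 0, bb-1 ≥ 0 (guaranteed by Pre_; Python raises ValueError below 0).
def leafIndicator (aa bb : Int) : Int :=
  let a : Int := (Nat.sqrt (aa - 1).toNat : Int)
  let b : Int := (Nat.sqrt (bb - 1).toNat : Int)
  if 0 < a ∧ 0 < b ∧ a * a + 1 = aa ∧ b * b + 1 = bb ∧ Int.gcd a b = 1 then 1 else 0

-- ===== PORT A =====
-- literal port of A's recursion; 'p ** j' with j drawn from range(...) (so j ≥ 0) is p ^ j.toNat,
-- exact there.  Where Python raises IndexError (lpfs[i] out of range) the port returns 0 — outside Pre_.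
def recurse (lpfs : List (Int × Int)) (i : Int) (aa : Int) (bb : Int) : Int :=
  if i = (lpfs.length : Int) then
    leafIndicator aa bb
  else
    match h : PySem.List.pyGet? lpfs i with
    | none => 0
    | some (p, e) =>
      if p = 2 then
        if PySem.Int.mod e 2 = 1 then
          recurse lpfs (i + 1) (2 * aa) bb + recurse lpfs (i + 1) aa (2 * bb)
        else
          recurse lpfs (i + 1) aa bb + recurse lpfs (i + 1) (2 * aa) (2 * bb)
      else
        (PySem.List.pyRange 0 (e + 1) 1).foldl (fun acc j =>
          acc + (PySem.List.pyRange 0 (e - j + 1) 1).foldl (fun acc2 k =>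
            acc2 + (if PySem.Int.mod (e - j - k) 2 = 0 then
              recurse lpfs (i + 1) (aa * p ^ j.toNat) (bb * p ^ k.toNat) else 0)) 0) 0
termination_by ((lpfs.length : Int) - i).toNat
decreasing_by
  all_goals
    have hin : PySem.Raise.InRange lpfs.length i := by
      by_contra hc
      rw [← PySem.List.pyGet?_eq_none_iff (xs := lpfs)] at hc
      simp [hc] at h
    unfold PySem.Raise.InRange at hin
    omega

-- ===== PORT B =====
-- port of Source B's helper _children
def childrenB (p : Int) (e : Int) (x : Int) (y : Int) : List (Int × Int) :=
  if p = 2 then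
    if PySem.Int.mod e 2 = 1 then [(2 * x, y), (x, 2 * y)]
    else [(x, y), (2 * x, 2 * y)]
  else
    (PySem.List.pyRange 0 (e + 1) 1).foldl (fun out j =>
      (PySem.List.pyRange 0 (e - j + 1) 1).foldl (fun out2 k =>
        if PySem.Int.mod (e - j - k) 2 = 0 then
          out2 ++ [(x * p ^ j.toNat, y * p ^ k.toNat)] else out2) out) []

-- literal port of Source B's worklist loop: states over lpfs[i:], then the counting pass
def recurse_alt (lpfs : List (Int × Int)) (i : Int) (aa : Int) (bb : Int) : Int :=
  let states :=
    (PySem.List.slice lpfs (some i) none).foldl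
      (fun states pe =>
        states.foldl (fun ns xy => ns ++ childrenB pe.1 pe.2 xy.1 xy.2) [])
      [(aa, bb)]
  states.foldl (fun total xy => total + leafIndicator xy.1 xy.2) 0

-- ===== PRECONDITION & SPEC =====
-- Pre_ admits 0 ≤ i ≤ len(lpfs) and either (a) some non-2 factor of lpfs[i:] has a negative
-- exponent — every recursion path then dies in an empty range before any isqrt — or (b) aa,bb ≥ 1
-- and every factor of lpfs[i:] has base ≥ 1 or exponent 0, so all leaves stay ≥ 1.  Outside (a)/(b)
-- A raises ValueError (math.isqrt of a negative at some leaf) or IndexError; the only excluded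
-- inputs on which A returns have i < 0, outside this helper's natural domain, where A's negative-
-- index wraparound walks a wrapped suffix and then the whole list again.
def Pre_recurse (lpfs : List (Int × Int)) (i : Int) (aa : Int) (bb : Int) : Prop :=
  0 ≤ i ∧ i ≤ (lpfs.length : Int) ∧
    ((∃ pe ∈ lpfs.drop i.toNat, pe.1 ≠ 2 ∧ pe.2 < 0) ∨
      (1 ≤ aa ∧ 1 ≤ bb ∧ ∀ pe ∈ lpfs.drop i.toNat, 1 ≤ pe.1 ∨ pe.2 = 0))
instance (lpfs : List (Int × Int)) (i : Int) (aa : Int) (bb : Int) : Decidable (Pre_recurse lpfs i aa bb) := by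
  unfold Pre_recurse; infer_instance

def pvWitness_recurse : (List (Int × Int)) × Int × Int × Int := ([(2, 2), (5, 1)], 0, 1, 1)

def Spec_recurse (lpfs : List (Int × Int)) (i : Int) (aa : Int) (bb : Int) (out : Int) : Prop := out = recurse_alt lpfs i aa bb
instance (lpfs : List (Int × Int)) (i : Int) (aa : Int) (bb : Int) (out : Int) : Decidable (Spec_recurse lpfs i aa bb out) := by unfold Spec_recurse; infer_instance

-- ===== CLAIM (what is proved, stated in full; the proofs are below) =====
def Claim_equal_recurse : Prop := ∀ (lpfs : List (Int × Int)) (i : Int) (aa : Int) (bb : Int), Dom_recurse lpfs i aa bb → Pre_recurse lpfs i aa bb → Spec_recurse lpfs i aa bb (recurse lpfs i aa bb)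

-- ===== LEMMAS AND PROOFS =====

-- reference recursion over the remaining factor list (proof device only)
def countFS : List (Int × Int) → Int → Int → Int
  | [], aa, bb => leafIndicator aa bb
  | pe :: fs, aa, bb =>
    ((childrenB pe.1 pe.2 aa bb).map (fun xy => countFS fs xy.1 xy.2)).sum

theorem sum_flatMap_int {α : Type} (l : List α) (f : α → List Int) :
    (l.flatMap f).sum = (l.map (fun a => (f a).sum)).sum := by
  induction l with
  | nil => simp
  | cons a l ih => simp [List.flatMap_cons, ih]

theorem foldl_if_append_flatMap {α : Type} (c : Int → Prop) [DecidablePred c]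
    (h : Int → α) (l : List Int) (acc : List α) :
    l.foldl (fun a k => if c k then a ++ [h k] else a) acc
      = acc ++ l.flatMap (fun k => if c k then [h k] else []) := by
  induction l generalizing acc with
  | nil => simp
  | cons k l ih => by_cases hc : c k <;> simp [ih, hc]

theorem nested_foldl_append {α : Type} (R2 : Int → List Int) (c : Int → Int → Prop)
    [∀ j k, Decidable (c j k)] (h : Int → Int → α) (R1 : List Int) (acc : List α) :
    R1.foldl (fun out j =>
        (R2 j).foldl (fun out2 k => if c j k then out2 ++ [h j k] else out2) out) acc
      = acc ++ R1.flatMap (fun j => (R2 j).flatMap (fun k => if c j k then [h j k] else [])) := by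
  induction R1 generalizing acc with
  | nil => simp
  | cons j R1 _ => simp [foldl_if_append_flatMap, List.flatMap_def]

theorem sum_map_childrenB (p e x y : Int) (f : Int × Int → Int) :
    ((childrenB p e x y).map f).sum =
      if p = 2 then
        (if PySem.Int.mod e 2 = 1 then f (2 * x, y) + f (x, 2 * y)
         else f (x, y) + f (2 * x, 2 * y))
      else
        (PySem.List.pyRange 0 (e + 1) 1).foldl (fun acc j =>
          acc + (PySem.List.pyRange 0 (e - j + 1) 1).foldl (fun acc2 k =>
            acc2 + (if PySem.Int.mod (e - j - k) 2 = 0 then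
              f (x * p ^ j.toNat, y * p ^ k.toNat) else 0)) 0) 0 := by
  unfold childrenB
  split_ifs with h1 h2
  · simp
  · simp
  · rw [nested_foldl_append (R2 := fun j => PySem.List.pyRange 0 (e - j + 1) 1)
        (c := fun j k => PySem.Int.mod (e - j - k) 2 = 0)
        (h := fun j k => (x * p ^ j.toNat, y * p ^ k.toNat))]
    rw [List.nil_append, List.map_flatMap, sum_flatMap_int]
    rw [PySem.List.foldl_add (g := fun j =>
      (PySem.List.pyRange 0 (e - j + 1) 1).foldl (fun acc2 k =>
        acc2 + (if PySem.Int.mod (e - j - k) 2 = 0 then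
          f (x * p ^ j.toNat, y * p ^ k.toNat) else 0)) 0)]
    rw [Int.zero_add]
    refine congrArg List.sum (List.map_congr_left ?_)
    intro j _
    rw [PySem.List.foldl_add (g := fun k =>
      (if PySem.Int.mod (e - j - k) 2 = 0 then
        f (x * p ^ j.toNat, y * p ^ k.toNat) else 0))]
    rw [Int.zero_add, List.map_flatMap, sum_flatMap_int]
    refine congrArg List.sum (List.map_congr_left ?_)
    intro k _
    split <;> simp

theorem recurse_eq_countFS_aux (lpfs : List (Int × Int)) :
    ∀ (n k : Nat), lpfs.length = k + n →
      ∀ aa bb, recurse lpfs (k : Int) aa bb = countFS (lpfs.drop k) aa bb := by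
  intro n
  induction n with
  | zero =>
    intro k hk aa bb
    rw [recurse]
    have hk' : (k : Int) = (lpfs.length : Int) := by omega
    rw [if_pos hk', List.drop_of_length_le (by omega)]
    rfl
  | succ n ih =>
    intro k hk aa bb
    have hklt : k < lpfs.length := by omega
    have ih' : ∀ x y, recurse lpfs ((k : Int) + 1) x y = countFS (lpfs.drop (k + 1)) x y := by
      intro x y
      have := ih (k + 1) (by omega) x y
      rwa [show (((k + 1 : Nat) : Int)) = (k : Int) + 1 by push_cast; ring] at this
    have hne : ¬ ((k : Int) = (lpfs.length : Int)) := by omega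
    have hget : PySem.List.pyGet? lpfs (k : Int) = some lpfs[k] := by
      rw [PySem.List.pyGet?_natCast, List.getElem?_eq_getElem hklt]
    rw [recurse, if_neg hne]
    split
    · next hnone => rw [hget] at hnone; cases hnone
    · next p e hsome =>
      have hpe : lpfs[k] = (p, e) := by
        rw [hget] at hsome; exact Option.some.inj hsome
      rw [List.drop_eq_getElem_cons hklt, hpe, countFS, sum_map_childrenB]
      simp only [ih']

theorem recurse_eq_countFS (lpfs : List (Int × Int)) (k : Nat) (hk : k ≤ lpfs.length)
    (aa bb : Int) : recurse lpfs (k : Int) aa bb = countFS (lpfs.drop k) aa bb :=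
  recurse_eq_countFS_aux lpfs (lpfs.length - k) k (by omega) aa bb

theorem expand_sum (fs : List (Int × Int)) (states : List (Int × Int)) :
    ((fs.foldl (fun states pe =>
        states.foldl (fun ns xy => ns ++ childrenB pe.1 pe.2 xy.1 xy.2) []) states).map
          (fun xy => leafIndicator xy.1 xy.2)).sum
      = (states.map (fun xy => countFS fs xy.1 xy.2)).sum := by
  induction fs generalizing states with
  | nil => simp [countFS]
  | cons pe fs ih =>
    rw [List.foldl_cons,
      PySem.List.foldl_append_eq_flatMap (g := fun xy : Int × Int => childrenB pe.1 pe.2 xy.1 xy.2),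
      List.nil_append, ih, List.map_flatMap, sum_flatMap_int]
    refine congrArg List.sum (List.map_congr_left ?_)
    intro xy _
    rw [countFS]

-- ===== VERDICT (by name: the statement is the Claim_ definition above) =====
theorem recurse_spec : Claim_equal_recurse := by
  intro lpfs i aa bb _ hpre
  obtain ⟨h0, hlen, -⟩ := hpre
  unfold Spec_recurse recurse_alt
  rw [PySem.List.slice_from lpfs h0]
  have hi : i = (i.toNat : Int) := (Int.toNat_of_nonneg h0).symm
  dsimp only
  rw [PySem.List.foldl_add (g := fun xy : Int × Int => leafIndicator xy.1 xy.2)]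
  rw [expand_sum]
  rw [hi, recurse_eq_countFS lpfs i.toNat (by omega)]
  have hmax : max i 0 = i := by omega
  simp [hmax]
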